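-- pv_equiv track=rewrite | github.com/Matteo-Candi/Master-Thesis | results/test_01/test_01_formatted.py | convert
-- ===== SOURCE A (Python) =====
-- def convert(st):
--     w = ""
--     z = ""
--     st = st.upper() + " "
--     for i in range(len(st)):
--         ch = st[i]
--         if ch != ' ':
--             w += ch
--         else:
--             z += w[0].lower() + w[1:] + " "
--             w = ""
--     return z
-- ===== SOURCE B (Python) =====
-- def convert(st):
--     return ''.join(w[0].lower() + w[1:] + ' ' for w in st.upper().split(' '))
-- ===== Notes on version B (the rewrite author's own statement) =====
-- stated objective: simpler
-- what changed: Replaces the manual character-by-character scan with a word accumulator and sentinel trailing space by a one-line split(' ') plus a single join of per-word pieces, avoiding repeated string concatenation.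
import Mathlib
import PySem

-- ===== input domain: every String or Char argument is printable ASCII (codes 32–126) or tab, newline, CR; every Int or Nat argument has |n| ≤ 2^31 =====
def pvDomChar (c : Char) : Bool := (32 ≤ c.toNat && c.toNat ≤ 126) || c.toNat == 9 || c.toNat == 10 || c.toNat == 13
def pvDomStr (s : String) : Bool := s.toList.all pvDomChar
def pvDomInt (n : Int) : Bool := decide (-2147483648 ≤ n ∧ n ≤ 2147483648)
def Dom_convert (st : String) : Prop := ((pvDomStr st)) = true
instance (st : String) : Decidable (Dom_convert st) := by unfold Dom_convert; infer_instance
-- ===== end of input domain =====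

-- B replaces A's manual character scan (word accumulator + sentinel trailing space) by split(' ') and a join of per-word pieces; same values everywhere A returns.

-- shared piece: the expression w[0].lower() + w[1:] + " " occurring verbatim in both Pythons;
-- pyGet? is none exactly where Python raises IndexError (w == ""), excluded by Pre_convert
def pvEmit (w : List Char) : List Char :=
  ((PySem.List.pyGet? w 0).elim [] (fun c => [PySem.Chars.lowerChar c]))
    ++ PySem.List.slice w (some 1) none ++ [' ']

-- ===== PORT A =====
-- the for-loop over the characters of st.upper() + " " with state (w, z)
def convertLoop : List Char → List Char → List Char → List Char
  | [], _w, z => z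
  | c :: rest, w, z =>
    if c ≠ ' ' then convertLoop rest (w ++ [c]) z
    else convertLoop rest [] (z ++ pvEmit w)

def convert (st : String) : String :=
  String.ofList (convertLoop (PySem.Chars.upper st.toList ++ [' ']) [] [])

-- ===== PORT B =====
-- st.upper().split(' ') for the single-character separator ' ' is List.splitOn ' ' (Python-exact here)
def convert_alt (st : String) : String :=
  String.ofList (((PySem.Chars.upper st.toList).splitOn ' ').flatMap pvEmit)

-- ===== PRECONDITION & SPEC =====
-- Pre_ excludes exactly the inputs where the Python A raises IndexError (an empty word, i.e.
-- empty input or a leading/trailing/double space); Python B raises there too.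
def Pre_convert (st : String) : Prop := ∀ w ∈ st.toList.splitOn ' ', w ≠ []
instance (st : String) : Decidable (Pre_convert st) := by unfold Pre_convert; infer_instance
def pvWitness_convert : String := "Hello World"
def Spec_convert (st : String) (out : String) : Prop := out = convert_alt st
instance (st : String) (out : String) : Decidable (Spec_convert st out) := by unfold Spec_convert; infer_instance

-- ===== CLAIM (what is proved, stated in full; the proofs are below) =====
def Claim_equal_convert : Prop := ∀ (st : String), Dom_convert st → Pre_convert st → Spec_convert st (convert st)

-- ===== LEMMAS AND PROOFS =====

theorem pvModifyHead_fun_id (l : List (List Char)) :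
    List.modifyHead (fun x => x) l = l := by
  cases l <;> simp

theorem convertLoop_eq (cs : List Char) : ∀ (w z : List Char),
    convertLoop (cs ++ [' ']) w z
      = z ++ (List.modifyHead (w ++ ·) (List.splitOnP (· == ' ') cs)).flatMap pvEmit := by
  induction cs with
  | nil =>
    intro w z
    simp [convertLoop, List.splitOnP_nil]
  | cons c rest ih =>
    intro w z
    by_cases h : c = ' '
    · subst h
      simp [convertLoop, List.splitOnP_cons, ih, pvModifyHead_fun_id]
    · simp only [List.cons_append, convertLoop, if_pos h, ih, List.splitOnP_cons,
        beq_iff_eq, if_neg h, List.modifyHead_modifyHead]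
      have hf : ((fun x => w ++ x) ∘ List.cons c) = (fun x => w ++ [c] ++ x) := by
        funext x; simp
      rw [hf]

-- ===== VERDICT (by name: the statement is the Claim_ definition above) =====
theorem convert_spec : Claim_equal_convert := by
  intro st _ _
  unfold Spec_convert convert convert_alt
  rw [convertLoop_eq]
  simp [pvModifyHead_fun_id, List.splitOn]
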